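-- pv_equiv track=rewrite | github.com/miliar/Code_Jam_Webscraper | solutions_python/solutions_year16_round1_nr1/682.py | solve
-- ===== SOURCE A (Python) =====
-- def solve(string):
-- 	answer = string[0]
-- 	for i in string[1:]:
-- 		if i>=answer[0]:
-- 			answer = i+answer
-- 		else:
-- 			answer += i
-- 	return answer
-- ===== SOURCE B (Python) =====
-- def solve(string):
--     maxes = [string[0]]
--     for c in string[1:]:
--         maxes.append(c if c >= maxes[-1] else maxes[-1])
--     records = [c for c, m in zip(string, maxes) if c == m]
--     others = [c for c, m in zip(string, maxes) if c != m]
--     return ''.join(records[::-1] + others)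
-- ===== Notes on version B (the rewrite author's own statement) =====
-- stated objective: faster
-- what changed: Replaces the single-pass greedy that prepends/appends onto one growing string with staged passes: first build the prefix-maximum array, then partition the characters by equality with their prefix maximum into records and others, and return reversed records followed by others.
import Mathlib
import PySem

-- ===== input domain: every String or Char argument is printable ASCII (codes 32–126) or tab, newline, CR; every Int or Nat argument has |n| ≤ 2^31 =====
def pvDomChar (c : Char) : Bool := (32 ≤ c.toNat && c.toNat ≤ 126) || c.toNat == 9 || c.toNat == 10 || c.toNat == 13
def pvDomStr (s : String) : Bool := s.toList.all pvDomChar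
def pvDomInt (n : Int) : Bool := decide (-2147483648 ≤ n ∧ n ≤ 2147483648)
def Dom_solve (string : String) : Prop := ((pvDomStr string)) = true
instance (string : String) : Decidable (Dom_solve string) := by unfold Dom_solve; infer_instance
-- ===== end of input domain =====

-- B replaces A's single-pass greedy (prepend/append onto one growing string) with staged
-- passes: build the prefix-maximum array, partition characters by equality with their prefix
-- maximum, return reversed records ++ others. Both raise IndexError on ""; Pre_ excludes it.

-- ===== PORT A =====
-- answer[0] on the always-nonempty answer is ported as headD (exact since answer ≠ []).
def solveLoopA : List Char → List Char → List Char
  | [], answer => answer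
  | i :: rest, answer =>
      if answer.headD 'a' ≤ i then solveLoopA rest (i :: answer)
      else solveLoopA rest (answer ++ [i])

def solve (string : String) : String :=
  match string.toList with
  | [] => ""            -- unreachable under Pre_solve (Python raises IndexError)
  | c :: rest => String.ofList (solveLoopA rest [c])

-- ===== PORT B =====
-- pass 1: maxes = prefix-maximum array (maxes[-1] ported as getLastD, exact: maxes ≠ [])
def maxesLoopB : List Char → List Char → List Char
  | [], ms => ms
  | c :: rest, ms =>
      maxesLoopB rest (ms ++ [if ms.getLastD 'a' ≤ c then c else ms.getLastD 'a'])

def solve_alt (string : String) : String :=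
  match string.toList with
  | [] => ""            -- unreachable under Pre_solve (Python raises IndexError)
  | c :: rest =>
      let maxes := maxesLoopB rest [c]
      let pairs := (c :: rest).zip maxes
      let records := (pairs.filter (fun p => p.1 == p.2)).map Prod.fst
      let others := (pairs.filter (fun p => p.1 != p.2)).map Prod.fst
      String.ofList (records.reverse ++ others)

-- ===== PRECONDITION & SPEC =====
-- A (and B) raise IndexError on the empty string; Pre_ excludes exactly that input.
def Pre_solve (string : String) : Prop := string ≠ ""
instance (string : String) : Decidable (Pre_solve string) := by unfold Pre_solve; infer_instance
def pvWitness_solve : String := "ba"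
def Spec_solve (string : String) (out : String) : Prop := out = solve_alt string
instance (string : String) (out : String) : Decidable (Spec_solve string out) := by unfold Spec_solve; infer_instance

-- ===== CLAIM =====
def Claim_equal_solve : Prop := ∀ (string : String), Dom_solve string → Pre_solve string → Spec_solve string (solve string)

-- ===== LEMMAS AND PROOFS =====

-- Common spec: records (weak prefix maxima) and the other characters, given current max m.
def recs : List Char → Char → List Char
  | [], _ => []
  | c :: rest, m => if m ≤ c then c :: recs rest c else recs rest m

def oth : List Char → Char → List Char
  | [], _ => []
  | c :: rest, m => if m ≤ c then oth rest c else c :: oth rest m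

-- prefix maxima of rest continuing from current max m
def ams : List Char → Char → List Char
  | [], _ => []
  | c :: rest, m => (if m ≤ c then c else m) :: ams rest (if m ≤ c then c else m)

theorem loopA_eq (rest : List Char) :
    ∀ (answer : List Char), answer ≠ [] →
      solveLoopA rest answer =
        (recs rest (answer.headD 'a')).reverse ++ answer ++ oth rest (answer.headD 'a') := by
  induction rest with
  | nil => intro a _; simp [solveLoopA, recs, oth]
  | cons c t ih =>
    intro a hne
    obtain ⟨h, l, rfl⟩ : ∃ h l, a = h :: l := by
      cases a with
      | nil => exact absurd rfl hne
      | cons h l => exact ⟨h, l, rfl⟩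
    by_cases hc : h ≤ c
    · have := ih (c :: h :: l) (by simp)
      simp only [List.headD_cons] at this ⊢
      simp [solveLoopA, recs, oth, hc, this]
    · have := ih ((h :: l) ++ [c]) (by simp)
      simp only [List.headD_cons, List.cons_append] at this ⊢
      simp [solveLoopA, recs, oth, hc, this]

theorem maxesLoopB_eq (rest : List Char) :
    ∀ (ms : List Char), ms ≠ [] →
      maxesLoopB rest ms = ms ++ ams rest (ms.getLastD 'a') := by
  induction rest with
  | nil => intro ms _; simp [maxesLoopB, ams]
  | cons c t ih =>
    intro ms hne
    have hlast : (ms ++ [if ms.getLastD 'a' ≤ c then c else ms.getLastD 'a']).getLastD 'a'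
        = if ms.getLastD 'a' ≤ c then c else ms.getLastD 'a' := by
      simp
    have := ih (ms ++ [if ms.getLastD 'a' ≤ c then c else ms.getLastD 'a']) (by simp)
    rw [hlast] at this
    simp only [maxesLoopB, this, ams, List.append_assoc, List.singleton_append]

theorem zip_filter_eq (rest : List Char) :
    ∀ (m : Char),
      ((rest.zip (ams rest m)).filter (fun p => p.1 == p.2)).map Prod.fst = recs rest m := by
  induction rest with
  | nil => intro m; simp [ams, recs]
  | cons c t ih =>
    intro m
    by_cases hc : m ≤ c
    · simp [ams, recs, hc, List.zip_cons_cons, ih]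
    · have hcm : c ≠ m := fun h => hc (le_of_eq h.symm)
      simp [ams, recs, hc, List.zip_cons_cons, hcm, ih]

theorem zip_filter_ne (rest : List Char) :
    ∀ (m : Char),
      ((rest.zip (ams rest m)).filter (fun p => p.1 != p.2)).map Prod.fst = oth rest m := by
  induction rest with
  | nil => intro m; simp [ams, oth]
  | cons c t ih =>
    intro m
    by_cases hc : m ≤ c
    · simp [ams, oth, hc, List.zip_cons_cons, ih]
    · have hcm : c ≠ m := fun h => hc (le_of_eq h.symm)
      simp [ams, oth, hc, List.zip_cons_cons, hcm, ih]

-- ===== VERDICT =====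
theorem solve_spec : Claim_equal_solve := by
  intro s _ hpre
  unfold Spec_solve solve solve_alt
  cases hs : s.toList with
  | nil => exact absurd (by simpa using congrArg String.ofList hs) hpre
  | cons c rest =>
    have hA := loopA_eq rest [c] (by simp)
    have hM := maxesLoopB_eq rest [c] (by simp)
    simp only [show ([c].getLastD 'a') = c from rfl] at hM
    simp only [List.headD_cons] at hA
    simp only [hA, hM, List.singleton_append, List.zip_cons_cons, List.filter_cons,
      BEq.rfl, bne_self_eq_false, if_true, Bool.false_eq_true, if_false, List.map_cons]
    rw [zip_filter_eq, zip_filter_ne]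
    simp
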